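-- pv_equiv track=rewrite | github.com/kanngji/thisisCodingTest | programmers/lv0/80.py | solution
-- ===== SOURCE A (Python) =====
-- def solution(spell, dic):
--     answer = 2
--     spellch=[0]*26
--     dicch=[0]*26
--     # spellch 배열에 한번 씩 넣기
--     for i in spell:
--         spellch[ord(i)-97]=1
--
--     # dic 배열 검사하기
--     for j in dic:
--         for el in j:
--             dicch[ord(el)-97]+=1
--
--         if spellch==dicch:
--             answer=1
--             return answer
--         # dic 배열 초기화
--         dicch=[0]*26
--
--     return answer
-- ===== SOURCE B (Python) =====
-- def solution(spell, dic):
--     index = {c: i for i, c in enumerate('abcdefghijklmnopqrstuvwxyz')}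
--     target = sorted({index[s] for s in spell})
--     for word in dic:
--         if sorted(index[c] for c in word) == target:
--             return 1
--     return 2
-- ===== Notes on version B (the rewrite author's own statement) =====
-- stated objective: simpler
-- what changed: Replaces the two 26-slot occurrence-count arrays and their per-word array-equality test by a precomputed letter-to-index table: sorted({index[s] for s in spell}) is computed once and compared against each word's sorted index list, returning early on the first match.
-- outside the precondition, e.g. on solution(['G'], ['a']): A returns 1, B raises KeyError
import Mathlib
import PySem

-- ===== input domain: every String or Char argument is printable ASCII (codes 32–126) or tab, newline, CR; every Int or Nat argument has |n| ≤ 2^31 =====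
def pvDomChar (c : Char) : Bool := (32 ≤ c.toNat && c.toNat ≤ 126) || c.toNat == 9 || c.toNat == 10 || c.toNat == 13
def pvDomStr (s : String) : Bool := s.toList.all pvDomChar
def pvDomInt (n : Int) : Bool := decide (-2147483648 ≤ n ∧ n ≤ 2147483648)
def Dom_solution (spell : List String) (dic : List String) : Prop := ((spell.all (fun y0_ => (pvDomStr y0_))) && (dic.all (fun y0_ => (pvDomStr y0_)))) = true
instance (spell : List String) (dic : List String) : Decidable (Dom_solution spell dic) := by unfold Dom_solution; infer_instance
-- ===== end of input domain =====

-- B replaces A's two 26-slot occurrence arrays by a letter→index table with one precomputed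
-- sorted target set compared against each word's sorted index list; objective: simpler.

-- ===== PORT A =====
-- ord(i) for a 1-character string; Python raises TypeError on other lengths (excluded by Pre_solution)
def pyOrd (s : String) : Int :=
  match s.toList with
  | [c] => (c.toNat : Int)
  | _ => 0

def solDicLoop (spellch : List Int) : List String → Int
  | [] => 2
  | j :: rest =>
    let dicch := j.toList.foldl
      (fun arr el => PySem.List.pySetD arr ((el.toNat : Int) - 97)
        (PySem.List.pyGetD arr ((el.toNat : Int) - 97) 0 + 1))
      (List.replicate 26 (0 : Int))
    if spellch = dicch then 1 else solDicLoop spellch rest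

def solution (spell : List String) (dic : List String) : Int :=
  let spellch := spell.foldl (fun arr i => PySem.List.pySetD arr (pyOrd i - 97) 1)
    (List.replicate 26 (0 : Int))
  solDicLoop spellch dic

-- ===== PORT B =====
-- index = {c: i for i, c in enumerate('abcdefghijklmnopqrstuvwxyz')}
def azIndex : PySem.Dict String Int :=
  (PySem.List.enumerate "abcdefghijklmnopqrstuvwxyz".toList 0).foldl
    (fun d p => d.insert (String.ofList [p.2]) p.1) PySem.Dict.empty

-- index[s] / index[c]: Python raises KeyError on a missing key (outside Pre_solution); the port
-- totalises with .getD 0 there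
def altLoop (index : PySem.Dict String Int) (target : List Int) : List String → Int
  | [] => 2
  | w :: rest =>
    if PySem.List.sorted (w.toList.map (fun c => (PySem.Dict.get? index (String.ofList [c])).getD 0))
        (fun x => x) false = target
    then 1 else altLoop index target rest

def solution_alt (spell : List String) (dic : List String) : Int :=
  let index := azIndex
  let target := PySem.List.sorted
    (PySem.Set.ofList (spell.map (fun s => (PySem.Dict.get? index s).getD 0))) (fun x => x) false
  altLoop index target dic

-- ===== PRECONDITION & SPEC =====
-- Pre_ excludes inputs on which A raises (TypeError on spell entries that are not single characters,
-- IndexError on character codes below 71 or above 122) and the inputs with character codes 71..96 on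
-- which A returns only through Python's accidental negative-index wraparound — B's letter→index
-- table raises KeyError on all of them.
def Pre_solution (spell : List String) (dic : List String) : Prop :=
  ((spell.all fun s => s.toList.length == 1 && s.toList.all fun c => 97 ≤ c.toNat && c.toNat ≤ 122)
    && (dic.all fun w => w.toList.all fun c => 97 ≤ c.toNat && c.toNat ≤ 122)) = true
instance (spell : List String) (dic : List String) : Decidable (Pre_solution spell dic) := by
  unfold Pre_solution; infer_instance

def pvWitness_solution : List String × List String := (["a", "b"], ["cab", "ab"])

def Spec_solution (spell : List String) (dic : List String) (out : Int) : Prop := out = solution_alt spell dic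
instance (spell : List String) (dic : List String) (out : Int) : Decidable (Spec_solution spell dic out) := by unfold Spec_solution; infer_instance

-- ===== CLAIM (what is proved, stated in full; the proofs are below) =====
def Claim_equal_solution : Prop := ∀ (spell : List String) (dic : List String), Dom_solution spell dic → Pre_solution spell dic → Spec_solution spell dic (solution spell dic)

-- ===== LEMMAS AND PROOFS =====

-- proof-only: the code of a 1-character string, as a Nat
def pyOrdN (s : String) : Nat :=
  match s.toList with
  | [c] => c.toNat
  | _ => 0

-- proof-only: what B's index lookup evaluates to on a character
def chVal (c : Char) : Int := (PySem.Dict.get? azIndex (String.ofList [c])).getD 0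

theorem pre_unfold {spell dic : List String} (h : Pre_solution spell dic) :
    (∀ s ∈ spell, ∃ c : Char, s.toList = [c] ∧ 97 ≤ c.toNat ∧ c.toNat ≤ 122) ∧
    (∀ w ∈ dic, ∀ c ∈ w.toList, 97 ≤ c.toNat ∧ c.toNat ≤ 122) := by
  unfold Pre_solution at h
  simp only [Bool.and_eq_true, List.all_eq_true, decide_eq_true_eq, beq_iff_eq] at h
  refine ⟨fun s hs => ?_, h.2⟩
  obtain ⟨c, hc⟩ := List.length_eq_one_iff.mp (h.1 s hs).1
  exact ⟨c, hc, (h.1 s hs).2 c (by simp [hc])⟩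

theorem char_toNat_inj {c d : Char} (h : c.toNat = d.toNat) : c = d := by
  apply Char.ext
  exact UInt32.toNat_inj.mp h

theorem az_lookup (c : Char) (h1 : 97 ≤ c.toNat) (h2 : c.toNat ≤ 122) :
    PySem.Dict.get? azIndex (String.ofList [c]) = some ((c.toNat : Int) - 97) := by
  have hall : ∀ k ∈ List.range 26,
      PySem.Dict.get? azIndex (String.ofList [Char.ofNat (97 + k)]) = some ((k : Nat) : Int) := by
    decide
  have hk : c.toNat - 97 ∈ List.range 26 := by simp; omega
  have h := hall _ hk
  rw [show 97 + (c.toNat - 97) = c.toNat by omega, Char.ofNat_toNat] at h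
  rw [h]
  congr 1
  omega

theorem chVal_eq (c : Char) (h1 : 97 ≤ c.toNat) (h2 : c.toNat ≤ 122) :
    chVal c = (c.toNat : Int) - 97 := by
  rw [chVal, az_lookup c h1 h2]
  rfl

theorem set_map_range (g : Nat → Int) (i : Nat) (v : Int) :
    ((List.range 26).map g).set i v = (List.range 26).map (fun k => if k = i then v else g k) := by
  apply List.ext_getElem
  · simp
  · intro n h1 h2
    simp only [List.getElem_set, List.getElem_map, List.getElem_range]
    by_cases hn : n = i <;> simp [hn]
    omega

theorem replicate_eq : List.replicate 26 (0 : Int) = (List.range 26).map (fun _ => 0) := by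
  simp [List.map_const']

theorem spell_fold (ss : List String)
    (hss : ∀ s ∈ ss, ∃ c : Char, s.toList = [c] ∧ 97 ≤ c.toNat ∧ c.toNat ≤ 122)
    (g : Nat → Int) :
    ss.foldl (fun arr i => PySem.List.pySetD arr (pyOrd i - 97) 1) ((List.range 26).map g)
    = (List.range 26).map (fun k => if 97 + k ∈ ss.map pyOrdN then (1 : Int) else g k) := by
  induction ss generalizing g with
  | nil => simp
  | cons s t ih =>
    obtain ⟨c, hc, hlo, hhi⟩ := hss s (by simp)
    have hordn : pyOrdN s = c.toNat := by simp [pyOrdN, hc]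
    have hord : pyOrd s - 97 = ((c.toNat - 97 : Nat) : Int) := by
      simp [pyOrd, hc]; omega
    have hset : PySem.List.pySetD ((List.range 26).map g) (pyOrd s - 97) 1
        = ((List.range 26).map g).set (c.toNat - 97) 1 := by
      rw [hord, PySem.List.pySetD_natCast]
    simp only [List.foldl_cons, hset, set_map_range g (c.toNat - 97) 1]
    rw [ih (fun s hs => hss s (by simp [hs]))]
    apply List.map_congr_left
    intro k hk
    simp only [List.mem_range] at hk
    by_cases hm : 97 + k ∈ t.map pyOrdN <;>
      by_cases hki : k = c.toNat - 97 <;>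
        simp [List.map_cons, List.mem_cons, hm, hki, hordn] <;> omega

theorem word_fold (cs : List Char)
    (hcs : ∀ c ∈ cs, 97 ≤ c.toNat ∧ c.toNat ≤ 122) (g : Nat → Int) :
    cs.foldl
      (fun arr el => PySem.List.pySetD arr ((el.toNat : Int) - 97)
        (PySem.List.pyGetD arr ((el.toNat : Int) - 97) 0 + 1)) ((List.range 26).map g)
    = (List.range 26).map (fun k => g k + ((cs.map Char.toNat).count (97 + k) : Int)) := by
  induction cs generalizing g with
  | nil => simp
  | cons c t ih =>
    obtain ⟨hlo, hhi⟩ := hcs c (by simp)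
    have hcast : (c.toNat : Int) - 97 = ((c.toNat - 97 : Nat) : Int) := by omega
    have hget : PySem.List.pyGetD ((List.range 26).map g) ((c.toNat : Int) - 97) 0
        = g (c.toNat - 97) := by
      rw [hcast, PySem.List.pyGetD_natCast]
      rw [List.getD_eq_getElem _ _ (by simp; omega)]
      simp
    have hset : ∀ v : Int, PySem.List.pySetD ((List.range 26).map g) ((c.toNat : Int) - 97) v
        = ((List.range 26).map g).set (c.toNat - 97) v := by
      intro v; rw [hcast, PySem.List.pySetD_natCast]
    simp only [List.foldl_cons, hget, hset, set_map_range g (c.toNat - 97) _]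
    rw [ih (fun c hc => hcs c (by simp [hc]))]
    apply List.map_congr_left
    intro k hk
    simp only [List.mem_range] at hk
    by_cases hki : k = c.toNat - 97
    · simp [List.map_cons, List.count_cons, hki]
      rw [if_pos (show c.toNat = 97 + (c.toNat - 97) by omega)]
      ring
    · simp [List.map_cons, List.count_cons, hki]
      omega

theorem count_map_eq_of_inj_on {α β : Type} [DecidableEq α] [DecidableEq β]
    (cs : List α) (f : α → β) (c : α) (h : ∀ x ∈ cs, f x = f c → x = c) :
    (cs.map f).count (f c) = cs.count c := by
  induction cs with
  | nil => simp
  | cons x t ih =>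
    have ht := ih (fun y hy => h y (by simp [hy]))
    by_cases hx : x = c
    · simp [List.map_cons, hx, ht]
    · have hfx : ¬ (f x = f c) := fun hf => hx (h x (by simp) hf)
      simp [List.map_cons, hx, hfx, ht]

theorem key_iff (spell : List String) (cs : List Char)
    (hs : ∀ s ∈ spell, ∃ c : Char, s.toList = [c] ∧ 97 ≤ c.toNat ∧ c.toNat ≤ 122)
    (hcs : ∀ c ∈ cs, 97 ≤ c.toNat ∧ c.toNat ≤ 122) :
    ((List.range 26).map (fun k => if 97 + k ∈ spell.map pyOrdN then (1 : Int) else 0)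
      = (List.range 26).map (fun k => (0 : Int) + ((cs.map Char.toNat).count (97 + k) : Int)))
    ↔ (cs.map chVal).Perm
        (PySem.Set.ofList (spell.map (fun s => (PySem.Dict.get? azIndex s).getD 0))) := by
  have hg : ∀ s ∈ spell, ∀ c : Char, s.toList = [c] →
      (PySem.Dict.get? azIndex s).getD 0 = (c.toNat : Int) - 97 := by
    intro s hsm c hc
    obtain ⟨c', hc', h1, h2⟩ := hs s hsm
    rw [hc] at hc'
    cases hc'
    rw [← String.ofList_toList (s := s), hc, az_lookup c h1 h2]
    rfl
  have hfc : ∀ c ∈ cs, chVal c = (c.toNat : Int) - 97 := by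
    intro c hc
    obtain ⟨h1, h2⟩ := hcs c hc
    exact chVal_eq c h1 h2
  have hinj : ∀ c0 ∈ cs, ∀ x ∈ cs, chVal x = chVal c0 → x = c0 := by
    intro c0 hc0 x hx h
    rw [hfc x hx, hfc c0 hc0] at h
    exact char_toNat_inj (by omega)
  rw [List.map_inj_left, List.perm_iff_count]
  simp only [List.mem_range, zero_add]
  constructor
  · intro h q
    by_cases hq : q ∈ spell.map (fun s => (PySem.Dict.get? azIndex s).getD 0)
    · obtain ⟨s, hsm, hgs⟩ := List.mem_map.mp hq
      obtain ⟨c, hc, h1, h2⟩ := hs s hsm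
      have hq' : q = (c.toNat : Int) - 97 := by rw [← hgs, hg s hsm c hc]
      have hmem : 97 + (c.toNat - 97) ∈ spell.map pyOrdN :=
        List.mem_map.mpr ⟨s, hsm, by simp [pyOrdN, hc]; omega⟩
      have hcount := h (c.toNat - 97) (by omega)
      rw [if_pos hmem] at hcount
      have hone : (cs.map Char.toNat).count (97 + (c.toNat - 97)) = 1 := by
        exact_mod_cast hcount.symm
      have e1 : List.count q
          (PySem.Set.ofList (spell.map (fun s => (PySem.Dict.get? azIndex s).getD 0))) = 1 :=
        List.count_eq_one_of_mem (PySem.Set.nodup_ofList _)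
          ((PySem.Set.mem_ofList _ _).mpr hq)
      have e2 : List.count q (cs.map chVal) = cs.count c := by
        by_cases hcin : c ∈ cs
        · rw [show q = chVal c by rw [hfc c hcin]; omega]
          exact count_map_eq_of_inj_on cs chVal c (hinj c hcin)
        · rw [List.count_eq_zero_of_not_mem hcin, List.count_eq_zero]
          intro hmq
          obtain ⟨x, hxm, hxv⟩ := List.mem_map.mp hmq
          have : x = c := char_toNat_inj (by rw [hfc x hxm] at hxv; omega)
          exact hcin (this ▸ hxm)
      have e3 : (cs.map Char.toNat).count c.toNat = cs.count c :=
        List.count_map_of_injective cs Char.toNat (fun _ _ => char_toNat_inj) c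
      rw [e1, e2, ← e3]
      rw [show (97 + (c.toNat - 97)) = c.toNat by omega] at hone
      exact hone.symm ▸ rfl
    · have e1 : List.count q
          (PySem.Set.ofList (spell.map (fun s => (PySem.Dict.get? azIndex s).getD 0))) = 0 :=
        List.count_eq_zero_of_not_mem (fun hm => hq ((PySem.Set.mem_ofList _ _).mp hm))
      rw [e1, List.count_eq_zero]
      intro hqm
      obtain ⟨c, hcm, hcv⟩ := List.mem_map.mp hqm
      obtain ⟨h1, h2⟩ := hcs c hcm
      have hcount := h (c.toNat - 97) (by omega)
      have hpos : 0 < (cs.map Char.toNat).count (97 + (c.toNat - 97)) := by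
        rw [show 97 + (c.toNat - 97) = c.toNat by omega]
        exact List.count_pos_iff.mpr (List.mem_map_of_mem hcm)
      by_cases hm : 97 + (c.toNat - 97) ∈ spell.map pyOrdN
      · obtain ⟨s, hsm, hps⟩ := List.mem_map.mp hm
        obtain ⟨c', hc', h1', h2'⟩ := hs s hsm
        have : c'.toNat = c.toNat := by simp [pyOrdN, hc'] at hps; omega
        apply hq
        refine List.mem_map.mpr ⟨s, hsm, ?_⟩
        rw [hg s hsm c' hc', ← hcv, hfc c hcm]
        omega
      · rw [if_neg hm] at hcount
        omega
  · intro h k hk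
    by_cases hsp : 97 + k ∈ spell.map pyOrdN
    · obtain ⟨s, hsm, hps⟩ := List.mem_map.mp hsp
      obtain ⟨c, hc, h1, h2⟩ := hs s hsm
      have hcn : c.toNat = 97 + k := by simp [pyOrdN, hc] at hps; omega
      have hq : ((k : Nat) : Int) ∈ spell.map (fun s => (PySem.Dict.get? azIndex s).getD 0) :=
        List.mem_map.mpr ⟨s, hsm, by rw [hg s hsm c hc]; omega⟩
      have hcount := h ((k : Nat) : Int)
      have e1 : List.count ((k : Nat) : Int)
          (PySem.Set.ofList (spell.map (fun s => (PySem.Dict.get? azIndex s).getD 0))) = 1 :=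
        List.count_eq_one_of_mem (PySem.Set.nodup_ofList _)
          ((PySem.Set.mem_ofList _ _).mpr hq)
      rw [e1] at hcount
      have e2 : List.count ((k : Nat) : Int) (cs.map chVal) = cs.count c := by
        by_cases hcin : c ∈ cs
        · rw [show ((k : Nat) : Int) = chVal c by rw [hfc c hcin]; omega]
          exact count_map_eq_of_inj_on cs chVal c (hinj c hcin)
        · rw [List.count_eq_zero_of_not_mem hcin, List.count_eq_zero]
          intro hmq
          obtain ⟨x, hxm, hxv⟩ := List.mem_map.mp hmq
          have : x = c := char_toNat_inj (by rw [hfc x hxm] at hxv; omega)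
          exact hcin (this ▸ hxm)
      rw [e2] at hcount
      have e3 : (cs.map Char.toNat).count (97 + k) = 1 := by
        rw [← hcn, List.count_map_of_injective cs Char.toNat (fun _ _ => char_toNat_inj) c]
        exact hcount
      rw [if_pos hsp, e3]
      simp
    · rw [if_neg hsp]
      have e0 : (cs.map Char.toNat).count (97 + k) = 0 := by
        rw [List.count_eq_zero]
        intro hm
        obtain ⟨c, hcm, hcn⟩ := List.mem_map.mp hm
        have hcount := h (chVal c)
        have hpos : 0 < (cs.map chVal).count (chVal c) := by
          rw [count_map_eq_of_inj_on cs chVal c (hinj c hcm)]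
          exact List.count_pos_iff.mpr hcm
        rw [hcount] at hpos
        have hmem : chVal c ∈ spell.map (fun s => (PySem.Dict.get? azIndex s).getD 0) :=
          (PySem.Set.mem_ofList _ _).mp (List.count_pos_iff.mp hpos)
        obtain ⟨s, hsm, hgs⟩ := List.mem_map.mp hmem
        obtain ⟨c', hc', h1', h2'⟩ := hs s hsm
        apply hsp
        refine List.mem_map.mpr ⟨s, hsm, ?_⟩
        have : (c'.toNat : Int) - 97 = chVal c := by rw [← hgs, hg s hsm c' hc']
        rw [hfc c hcm] at this
        simp [pyOrdN, hc']
        omega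
      rw [e0]
      simp

theorem loop_eq (spell : List String)
    (hs : ∀ s ∈ spell, ∃ c : Char, s.toList = [c] ∧ 97 ≤ c.toNat ∧ c.toNat ≤ 122)
    (dic : List String) (hd : ∀ w ∈ dic, ∀ c ∈ w.toList, 97 ≤ c.toNat ∧ c.toNat ≤ 122) :
    solDicLoop ((List.range 26).map (fun k => if 97 + k ∈ spell.map pyOrdN then (1 : Int) else 0)) dic
    = altLoop azIndex (PySem.List.sorted
        (PySem.Set.ofList (spell.map (fun s => (PySem.Dict.get? azIndex s).getD 0)))
        (fun x => x) false) dic := by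
  induction dic with
  | nil => rfl
  | cons w rest ih =>
    have hw := hd w (by simp)
    simp only [solDicLoop, altLoop]
    rw [replicate_eq, word_fold w.toList hw]
    rw [show (fun c => (PySem.Dict.get? azIndex (String.ofList [c])).getD 0) = chVal from rfl]
    have hiff := (key_iff spell w.toList hs hw).trans
      (PySem.List.sorted_id_eq_sorted_id_iff_perm (xs := w.toList.map chVal)
        (ys := PySem.Set.ofList (spell.map (fun s => (PySem.Dict.get? azIndex s).getD 0)))).symm
    rw [if_congr hiff rfl (ih (fun w h => hd w (by simp [h])))]

-- ===== VERDICT (by name: the statement is the Claim_ definition above) =====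
theorem solution_spec : Claim_equal_solution := by
  intro spell dic _ hpre
  obtain ⟨hs, hd⟩ := pre_unfold hpre
  unfold Spec_solution
  show solution spell dic = solution_alt spell dic
  simp only [solution, solution_alt]
  rw [replicate_eq, spell_fold spell hs]
  exact loop_eq spell hs dic hd
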